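-- pv_equiv track=rewrite | github.com/gwicho38/politician-trading-tracker | python-micro-service/politician_trading/pipeline/normalize.py | _infer_asset_type
-- ===== SOURCE A (Python) =====
-- from typing import List, Optional, Tuple
--
-- def _infer_asset_type(asset_name: str, asset_ticker: Optional[str]) -> str:
--     """Infer asset type from asset name and ticker"""
--     asset_lower = asset_name.lower()
--
--     # Check for specific indicators
--     if any(word in asset_lower for word in ["fund", "mutual", "etf", "index"]):
--         if "etf" in asset_lower or "exchange traded" in asset_lower:
--             return "etf"
--         return "mutual_fund"
--
--     if any(word in asset_lower for word in ["bond", "treasury", "note", "bill"]):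
--         return "bond"
--
--     if any(word in asset_lower for word in ["option", "call", "put"]):
--         return "option"
--
--     if any(word in asset_lower for word in ["crypto", "bitcoin", "ethereum"]):
--         return "cryptocurrency"
--
--     # If has ticker, likely a stock
--     if asset_ticker:
--         return "stock"
--
--     # Default to stock if can't determine
--     return "stock"
-- ===== SOURCE B (Python) =====
-- _KEYWORD_TAGS = {
--     "fund": "fundlike", "mutual": "fundlike", "etf": "etf", "index": "fundlike",
--     "exchange traded": "xtraded",
--     "bond": "bond", "treasury": "bond", "note": "bond", "bill": "bond",
--     "option": "option", "call": "option", "put": "option",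
--     "crypto": "crypto", "bitcoin": "crypto", "ethereum": "crypto",
-- }
--
--
-- def _infer_asset_type(asset_name, asset_ticker):
--     """Infer asset type: one scan tagging keyword hits, then a priority lookup."""
--     s = asset_name.lower()
--     tags = {tag for kw, tag in _KEYWORD_TAGS.items() if kw in s}
--     if "etf" in tags or ("fundlike" in tags and "xtraded" in tags):
--         return "etf"
--     if "fundlike" in tags:
--         return "mutual_fund"
--     if "bond" in tags:
--         return "bond"
--     if "option" in tags:
--         return "option"
--     if "crypto" in tags:
--         return "cryptocurrency"
--     return "stock"
-- ===== Notes on version B (the rewrite author's own statement) =====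
-- stated objective: alternative
-- what changed: Replaces the cascade of any()-over-keyword-list branches by a single flat keyword->tag table scanned once to collect a tag set, followed by a priority lookup on the tags (the nested etf/mutual_fund case becomes a boolean combination of tags; the redundant ticker branch is dropped since both paths return 'stock').
import Mathlib
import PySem

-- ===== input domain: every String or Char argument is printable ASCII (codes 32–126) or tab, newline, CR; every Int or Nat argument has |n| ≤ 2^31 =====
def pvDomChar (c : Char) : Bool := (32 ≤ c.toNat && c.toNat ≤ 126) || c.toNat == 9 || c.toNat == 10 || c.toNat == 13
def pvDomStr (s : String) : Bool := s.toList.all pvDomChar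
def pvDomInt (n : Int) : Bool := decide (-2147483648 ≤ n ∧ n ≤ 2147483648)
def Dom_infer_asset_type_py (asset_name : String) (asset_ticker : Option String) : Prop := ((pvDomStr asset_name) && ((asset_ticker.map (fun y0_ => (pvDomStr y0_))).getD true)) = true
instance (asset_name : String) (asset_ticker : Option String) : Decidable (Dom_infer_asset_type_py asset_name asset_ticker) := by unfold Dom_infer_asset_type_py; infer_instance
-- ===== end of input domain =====

-- B: one flat keyword→tag table scanned once into a tag set, then a priority lookup
-- (same result as A\'s branch cascade; return-value equivalence, no side effects involved).
-- ===== PORT A =====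
def infer_asset_type_py (asset_name : String) (asset_ticker : Option String) : String :=
  let asset_lower := PySem.Str.lower asset_name
  if ["fund", "mutual", "etf", "index"].any (fun word => PySem.Str.isIn word asset_lower) then
    if PySem.Str.isIn "etf" asset_lower || PySem.Str.isIn "exchange traded" asset_lower then "etf"
    else "mutual_fund"
  else if ["bond", "treasury", "note", "bill"].any (fun word => PySem.Str.isIn word asset_lower) then "bond"
  else if ["option", "call", "put"].any (fun word => PySem.Str.isIn word asset_lower) then "option"
  else if ["crypto", "bitcoin", "ethereum"].any (fun word => PySem.Str.isIn word asset_lower) then "cryptocurrency"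
  -- `if asset_ticker:` — truthy iff Some nonempty string (exact Python truthiness)
  else if (asset_ticker.map (fun t => !(t == ""))).getD false then "stock"
  else "stock"

-- ===== PORT B =====
def pvKeywordTags : List (String × String) :=
  [("fund", "fundlike"), ("mutual", "fundlike"), ("etf", "etf"), ("index", "fundlike"),
   ("exchange traded", "xtraded"),
   ("bond", "bond"), ("treasury", "bond"), ("note", "bond"), ("bill", "bond"),
   ("option", "option"), ("call", "option"), ("put", "option"),
   ("crypto", "crypto"), ("bitcoin", "crypto"), ("ethereum", "crypto")]

def infer_asset_type_py_alt (asset_name : String) (asset_ticker : Option String) : String :=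
  let s := PySem.Str.lower asset_name
  let tags : PySem.Set String :=
    PySem.Set.ofList ((pvKeywordTags.filter (fun p => PySem.Str.isIn p.1 s)).map Prod.snd)
  if tags.contains "etf" || (tags.contains "fundlike" && tags.contains "xtraded") then "etf"
  else if tags.contains "fundlike" then "mutual_fund"
  else if tags.contains "bond" then "bond"
  else if tags.contains "option" then "option"
  else if tags.contains "crypto" then "cryptocurrency"
  else "stock"

-- ===== PRECONDITION & SPEC =====
def Spec_infer_asset_type_py (asset_name : String) (asset_ticker : Option String) (out : String) : Prop := out = infer_asset_type_py_alt asset_name asset_ticker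
instance (asset_name : String) (asset_ticker : Option String) (out : String) : Decidable (Spec_infer_asset_type_py asset_name asset_ticker out) := by unfold Spec_infer_asset_type_py; infer_instance

-- ===== CLAIM (what is proved, stated in full; the proofs are below) =====
def Claim_equal_infer_asset_type_py : Prop := ∀ (asset_name : String) (asset_ticker : Option String), Dom_infer_asset_type_py asset_name asset_ticker → Spec_infer_asset_type_py asset_name asset_ticker (infer_asset_type_py asset_name asset_ticker)

-- ===== LEMMAS AND PROOFS =====

-- the tag set B builds, as a function of the lowered name
def pvTags (s : String) : PySem.Set String :=
  PySem.Set.ofList ((pvKeywordTags.filter (fun p => PySem.Str.isIn p.1 s)).map Prod.snd)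

theorem pvTags_contains (s tag : String) :
    (pvTags s).contains tag = true ↔
      ∃ p ∈ pvKeywordTags, PySem.Str.isIn p.1 s = true ∧ p.2 = tag := by
  simp [pvTags, PySem.Set.mem_ofList, List.mem_map, List.mem_filter,
    and_comm]

theorem pvTags_etf (s : String) : (pvTags s).contains "etf" = PySem.Str.isIn "etf" s := by
  rw [Bool.eq_iff_iff, pvTags_contains]
  simp [pvKeywordTags]

theorem pvTags_fundlike (s : String) : (pvTags s).contains "fundlike" =
    (PySem.Str.isIn "fund" s || (PySem.Str.isIn "mutual" s || PySem.Str.isIn "index" s)) := by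
  rw [Bool.eq_iff_iff, pvTags_contains]
  simp [pvKeywordTags]

theorem pvTags_xtraded (s : String) : (pvTags s).contains "xtraded" =
    PySem.Str.isIn "exchange traded" s := by
  rw [Bool.eq_iff_iff, pvTags_contains]
  simp [pvKeywordTags]

theorem pvTags_bond (s : String) : (pvTags s).contains "bond" =
    (PySem.Str.isIn "bond" s || (PySem.Str.isIn "treasury" s ||
      (PySem.Str.isIn "note" s || PySem.Str.isIn "bill" s))) := by
  rw [Bool.eq_iff_iff, pvTags_contains]
  simp [pvKeywordTags]

theorem pvTags_option (s : String) : (pvTags s).contains "option" =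
    (PySem.Str.isIn "option" s || (PySem.Str.isIn "call" s || PySem.Str.isIn "put" s)) := by
  rw [Bool.eq_iff_iff, pvTags_contains]
  simp [pvKeywordTags]

theorem pvTags_crypto (s : String) : (pvTags s).contains "crypto" =
    (PySem.Str.isIn "crypto" s || (PySem.Str.isIn "bitcoin" s || PySem.Str.isIn "ethereum" s)) := by
  rw [Bool.eq_iff_iff, pvTags_contains]
  simp [pvKeywordTags]

-- ===== VERDICT (by name: the statement is the Claim_ definition above) =====
theorem infer_asset_type_py_spec : Claim_equal_infer_asset_type_py := by
  intro asset_name asset_ticker _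
  unfold Spec_infer_asset_type_py infer_asset_type_py infer_asset_type_py_alt
  simp only [List.any_cons, List.any_nil, Bool.or_false, ← pvTags.eq_def,
    pvTags_etf, pvTags_fundlike, pvTags_xtraded, pvTags_bond, pvTags_option, pvTags_crypto]
  set s := PySem.Str.lower asset_name with hs
  by_cases h1 : PySem.Str.isIn "fund" s = true <;>
  by_cases h2 : PySem.Str.isIn "mutual" s = true <;>
  by_cases h3 : PySem.Str.isIn "etf" s = true <;>
  by_cases h4 : PySem.Str.isIn "index" s = true <;>
  by_cases h5 : PySem.Str.isIn "exchange traded" s = true <;>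
  simp_all
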